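-- pv_equiv track=rewrite | github.com/dfannius/whr-ayd | whr.py | date_str_ticks
-- ===== SOURCE A (Python) =====
-- from typing import Dict, List, Mapping, Optional, Set
--
-- def date_to_season_cycle(d):
--     season = int(d/4)
--     cycle = d - season * 4
--     return (season, cycle)
--
-- def date_str_ticks(dates: List[int]):
--     # Put a label just on the middle cycle of each season, unless the player didn't play that one.
--     tick_labels = ["" for d in dates]
--     seasons_seen = set()
--     seasons_cycles = [date_to_season_cycle(d) for d in dates]
--     # First label middle cycles
--     for (i,d) in enumerate(dates):
--         (season, cycle) = seasons_cycles[i]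
--         if cycle == 1:
--             tick_labels[i] = str(season)
--             seasons_seen.add(season)
--     # Make sure we label seasons whose middle cycles are missing
--     for (i,d) in enumerate(dates):
--         (season, cycle) = seasons_cycles[i]
--         if not season in seasons_seen:
--             tick_labels[i] = str(season)
--             seasons_seen.add(season)
--
--     return tick_labels
-- ===== SOURCE B (Python) =====
-- def date_str_ticks(dates):
--     # Group-by-season: one pass builds season -> (middle-cycle indices, first index),
--     # then labels are emitted per season from that index.
--     info = {}  # season -> (list of indices with cycle == 1, first index where season appears)
--     for i, d in enumerate(dates):
--         season = int(d / 4)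
--         if season not in info:
--             info[season] = ([], i)
--         if d - season * 4 == 1:
--             info[season][0].append(i)
--     labels = [""] * len(dates)
--     for season, (mids, first) in info.items():
--         if mids:
--             for i in mids:
--                 labels[i] = str(season)
--         else:
--             labels[first] = str(season)
--     return labels
-- ===== Notes on version B (the rewrite author's own statement) =====
-- stated objective: alternative
-- what changed: Replaces A's two index-ordered scans with a seen-set (plus a separate season/cycle comprehension) by a single grouping pass that builds a dict season -> (middle-cycle indices, first index) and then emits the labels per season from that index.
import Mathlib
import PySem

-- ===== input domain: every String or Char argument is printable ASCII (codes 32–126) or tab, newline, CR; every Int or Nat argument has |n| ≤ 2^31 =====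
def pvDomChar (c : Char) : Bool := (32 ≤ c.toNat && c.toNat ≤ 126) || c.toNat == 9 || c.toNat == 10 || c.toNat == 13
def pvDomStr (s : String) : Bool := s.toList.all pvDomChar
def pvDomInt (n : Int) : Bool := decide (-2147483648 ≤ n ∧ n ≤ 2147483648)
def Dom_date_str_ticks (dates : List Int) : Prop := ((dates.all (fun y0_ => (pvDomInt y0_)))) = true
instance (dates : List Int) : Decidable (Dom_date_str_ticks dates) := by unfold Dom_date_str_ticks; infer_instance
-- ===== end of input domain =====

-- B groups the indices by season in one dict pass (season -> (middle-cycle indices, first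
-- index)) and then emits the labels per season, instead of A's two index-ordered scans with
-- a seen-set; objective: alternative (same cost, different organisation).

-- ===== PORT A =====
def date_to_season_cycle (d : Int) : Int × Int :=
  let season := PySem.Int.truncdiv d 4   -- int(d/4): truncation toward zero; exact for |d| ≤ 2^31
  let cycle := d - season * 4
  (season, cycle)

-- body of A's first loop ("First label middle cycles")
def aPass1 (seasons_cycles : List (Int × Int)) (st : List String × PySem.Set Int)
    (p : Int × Int) : List String × PySem.Set Int :=
  let sc := PySem.List.pyGetD seasons_cycles p.1 (0, 0)
  if sc.2 == 1 then
    (PySem.List.pySetD st.1 p.1 (PySem.Int.toStr sc.1), PySem.Set.add st.2 sc.1)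
  else st

-- body of A's second loop ("label seasons whose middle cycles are missing")
def aPass2 (seasons_cycles : List (Int × Int)) (st : List String × PySem.Set Int)
    (p : Int × Int) : List String × PySem.Set Int :=
  let sc := PySem.List.pyGetD seasons_cycles p.1 (0, 0)
  if !(PySem.Set.contains st.2 sc.1) then
    (PySem.List.pySetD st.1 p.1 (PySem.Int.toStr sc.1), PySem.Set.add st.2 sc.1)
  else st

def date_str_ticks (dates : List Int) : List String :=
  let tick_labels := dates.map (fun _ => "")
  let seasons_cycles := dates.map date_to_season_cycle
  let st1 := (PySem.List.enumerate dates).foldl (aPass1 seasons_cycles)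
               (tick_labels, PySem.Set.empty)
  let st2 := (PySem.List.enumerate dates).foldl (aPass2 seasons_cycles) st1
  st2.1

-- ===== PORT B =====
-- season of a date, as B computes it inline
def seaF (d : Int) : Int := PySem.Int.truncdiv d 4   -- int(d/4); exact for |d| ≤ 2^31

-- body of B's grouping loop: 'if season not in info: info[season] = ([], i)';
-- 'if d - season*4 == 1: info[season][0].append(i)' (the in-place append is the modify)
def bStep (d : PySem.Dict Int (List Int × Int)) (p : Int × Int) :
    PySem.Dict Int (List Int × Int) :=
  let season := seaF p.2
  let d' := if d.contains season then d else d.insert season (([] : List Int), p.1)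
  if p.2 - season * 4 == 1 then
    d'.modify season ([], 0) (fun mf => (mf.1 ++ [p.1], mf.2))
  else d'

-- body of B's emission loop over info.items()
def bEmit (lb : List String) (e : Int × (List Int × Int)) : List String :=
  if e.2.1 ≠ [] then
    e.2.1.foldl (fun lb i => PySem.List.pySetD lb i (PySem.Int.toStr e.1)) lb
  else PySem.List.pySetD lb e.2.2 (PySem.Int.toStr e.1)

def date_str_ticks_alt (dates : List Int) : List String :=
  let info := (PySem.List.enumerate dates).foldl bStep PySem.Dict.empty
  let labels := List.replicate dates.length ""
  info.items.foldl bEmit labels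

-- ===== PRECONDITION & SPEC =====
def Spec_date_str_ticks (dates : List Int) (out : List String) : Prop := out = date_str_ticks_alt dates
instance (dates : List Int) (out : List String) : Decidable (Spec_date_str_ticks dates out) := by unfold Spec_date_str_ticks; infer_instance

-- ===== CLAIM (what is proved, stated in full; the proofs are below) =====
def Claim_equal_date_str_ticks : Prop := ∀ (dates : List Int), Dom_date_str_ticks dates → Spec_date_str_ticks dates (date_str_ticks dates)

-- ===== LEMMAS AND PROOFS =====

-- cycle of a date (proof-side shorthand; B's test 'd - season*4 == 1' is this by definition)
def cycF (d : Int) : Int := d - seaF d * 4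

-- ---- A-side characterisation (labels as written by A's two passes) ----

-- the two loop bodies with the season/cycle lookup already resolved (for the invariants)
def g1 (st : List String × PySem.Set Int) (p : Int × Int) : List String × PySem.Set Int :=
  if cycF p.2 == 1 then
    (PySem.List.pySetD st.1 p.1 (PySem.Int.toStr (seaF p.2)), PySem.Set.add st.2 (seaF p.2))
  else st

def g2 (st : List String × PySem.Set Int) (p : Int × Int) : List String × PySem.Set Int :=
  if !(PySem.Set.contains st.2 (seaF p.2)) then
    (PySem.List.pySetD st.1 p.1 (PySem.Int.toStr (seaF p.2)), PySem.Set.add st.2 (seaF p.2))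
  else st

theorem foldl_congr' {α β : Type} (l : List α) (f g : β → α → β) (s : β)
    (h : ∀ b, ∀ x ∈ l, f b x = g b x) : l.foldl f s = l.foldl g s := by
  induction l generalizing s with
  | nil => rfl
  | cons x xs ih =>
      simp only [List.foldl_cons]
      rw [h s x (by simp)]
      exact ih _ (fun b y hy => h b y (by simp [hy]))

-- on pairs coming from 'enumerate dates', aPass1/aPass2 compute g1/g2
theorem aPass1_eq_g1 (dates : List Int) (st : List String × PySem.Set Int)
    (p : Int × Int) (hp : p ∈ PySem.List.enumerate dates) :
    aPass1 (dates.map date_to_season_cycle) st p = g1 st p := by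
  rcases (PySem.List.mem_enumerate_iff dates 0 p).mp hp with ⟨k, hk, rfl⟩
  simp [aPass1, g1, date_to_season_cycle, seaF, cycF, List.getD_eq_getElem?_getD,
    List.getElem?_map, List.getElem?_eq_getElem hk]

theorem aPass2_eq_g2 (dates : List Int) (st : List String × PySem.Set Int)
    (p : Int × Int) (hp : p ∈ PySem.List.enumerate dates) :
    aPass2 (dates.map date_to_season_cycle) st p = g2 st p := by
  rcases (PySem.List.mem_enumerate_iff dates 0 p).mp hp with ⟨k, hk, rfl⟩
  simp [aPass2, g2, date_to_season_cycle, seaF, List.getD_eq_getElem?_getD,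
    List.getElem?_map, List.getElem?_eq_getElem hk]

theorem g1_length (ps : List (Int × Int)) (st : List String × PySem.Set Int) :
    ((ps.foldl g1 st).1).length = st.1.length := by
  induction ps generalizing st with
  | nil => rfl
  | cons p rest ih =>
      simp only [List.foldl_cons]
      rw [ih]
      unfold g1
      split <;> simp [PySem.List.length_pySetD]

theorem g1_snd_mem (ps : List (Int × Int)) (st : List String × PySem.Set Int) (x : Int) :
    x ∈ (ps.foldl g1 st).2 ↔ x ∈ st.2 ∨ ∃ p ∈ ps, cycF p.2 = 1 ∧ seaF p.2 = x := by
  induction ps generalizing st with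
  | nil => simp
  | cons p rest ih =>
      simp only [List.foldl_cons]
      rw [ih]
      unfold g1
      by_cases hc : cycF p.2 = 1
      · simp [hc, PySem.Set.mem_add]
        constructor
        · rintro ((h | h) | h)
          · exact Or.inl h
          · exact Or.inr (Or.inl h.symm)
          · exact Or.inr (Or.inr h)
        · rintro (h | h | h)
          · exact Or.inl (Or.inl h)
          · exact Or.inl (Or.inr h.symm)
          · exact Or.inr h
      · simp [hc]

theorem getD_set_eq_ite (l : List String) (k j : Nat) (v : String) (hk : k < l.length) :
    (l.set k v)[j]?.getD "" = if k = j then v else l[j]?.getD "" := by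
  simp only [List.getElem?_set, hk, if_true]
  split <;> simp

theorem g1_get (dates : List Int) (ps : List (Int × Int)) (st : List String × PySem.Set Int)
    (j : Nat)
    (hv : ∀ p ∈ ps, ∃ k : Nat, k < dates.length ∧ p = ((k : Int), dates[k]?.getD 0))
    (hj : j < dates.length) (hlen : st.1.length = dates.length) :
    (ps.foldl g1 st).1[j]?.getD "" =
      if ((j : Int), dates[j]?.getD 0) ∈ ps ∧ cycF (dates[j]?.getD 0) = 1
      then PySem.Int.toStr (seaF (dates[j]?.getD 0)) else st.1[j]?.getD "" := by
  revert hv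
  induction ps generalizing st with
  | nil => intro _; simp
  | cons p rest ih =>
      intro hv
      obtain ⟨k, hk, hp⟩ := hv p (by simp)
      subst hp
      have hv' : ∀ q ∈ rest, ∃ k : Nat, k < dates.length ∧ q = ((k : Int), dates[k]?.getD 0) :=
        fun q hq => hv q (by simp [hq])
      simp only [List.foldl_cons]
      by_cases hc : cycF (dates[k]?.getD 0) = 1
      · have hg : g1 st ((k : Int), dates[k]?.getD 0) =
            (st.1.set k (PySem.Int.toStr (seaF (dates[k]?.getD 0))),
             PySem.Set.add st.2 (seaF (dates[k]?.getD 0))) := by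
          simp only [g1]
          rw [if_pos (by simpa using hc)]
          simp
        rw [hg, ih _ (by simpa using hlen) hv',
            getD_set_eq_ite _ _ _ _ (by omega)]
        by_cases hjk : j = k
        · subst hjk
          simp [hc]
        · simp [hjk, Ne.symm hjk]
      · have hg : g1 st ((k : Int), dates[k]?.getD 0) = st := by
          simp only [g1]
          rw [if_neg (by simpa using hc)]
        rw [hg, ih _ hlen hv']
        by_cases hjk : j = k
        · subst hjk
          simp [hc]
        · simp [hjk]

theorem g2_get (dates : List Int) (ps : List (Int × Int)) (st : List String × PySem.Set Int)
    (j : Nat)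
    (hv : ∀ p ∈ ps, ∃ k : Nat, k < dates.length ∧ p = ((k : Int), dates[k]?.getD 0))
    (hj : j < dates.length) (hlen : st.1.length = dates.length) :
    (ps.foldl g2 st).1[j]?.getD "" =
      if seaF (dates[j]?.getD 0) ∉ st.2 ∧
         ps.find? (fun p => seaF p.2 == seaF (dates[j]?.getD 0)) =
           some ((j : Int), dates[j]?.getD 0)
      then PySem.Int.toStr (seaF (dates[j]?.getD 0)) else st.1[j]?.getD "" := by
  revert hv
  induction ps generalizing st with
  | nil => intro _; simp
  | cons p rest ih =>
      intro hv
      obtain ⟨k, hk, hp⟩ := hv p (by simp)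
      subst hp
      have hv' : ∀ q ∈ rest, ∃ k : Nat, k < dates.length ∧ q = ((k : Int), dates[k]?.getD 0) :=
        fun q hq => hv q (by simp [hq])
      simp only [List.foldl_cons]
      by_cases hm : seaF (dates[k]?.getD 0) ∈ st.2
      · have hg : g2 st ((k : Int), dates[k]?.getD 0) = st := by
          simp only [g2]
          rw [if_neg (by simpa using hm)]
        rw [hg, ih _ hlen hv']
        by_cases hs : seaF (dates[k]?.getD 0) = seaF (dates[j]?.getD 0)
        · have hmj : seaF (dates[j]?.getD 0) ∈ st.2 := hs ▸ hm
          simp [List.find?_cons, hs, hmj]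
        · rw [show List.find? (fun p => seaF p.2 == seaF (dates[j]?.getD 0))
                (((k : Int), dates[k]?.getD 0) :: rest) =
              List.find? (fun p => seaF p.2 == seaF (dates[j]?.getD 0)) rest from by
            simp [List.find?_cons, hs]]
      · have hg : g2 st ((k : Int), dates[k]?.getD 0) =
            (st.1.set k (PySem.Int.toStr (seaF (dates[k]?.getD 0))),
             PySem.Set.add st.2 (seaF (dates[k]?.getD 0))) := by
          simp only [g2]
          rw [if_pos (by simp [PySem.Set.contains_iff, hm])]
          simp
        rw [hg, ih _ (by simpa using hlen) hv',
            getD_set_eq_ite _ _ _ _ (by omega)]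
        by_cases hs : seaF (dates[k]?.getD 0) = seaF (dates[j]?.getD 0)
        · have hmem : seaF (dates[j]?.getD 0) ∈ PySem.Set.add st.2 (seaF (dates[k]?.getD 0)) := by
            rw [PySem.Set.mem_add]
            exact Or.inr hs.symm
          have hmj : seaF (dates[j]?.getD 0) ∉ st.2 := fun h => hm (hs ▸ h)
          by_cases hjk : j = k
          · subst hjk
            simp [hmem, List.find?_cons, hs, hmj]
          · have hne : ¬ (((k : Int), dates[k]?.getD 0) = ((j : Int), dates[j]?.getD 0)) := by
              intro h
              have := congrArg Prod.fst h
              simp only [Int.natCast_inj] at this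
              exact hjk this.symm
            simp [hmem, List.find?_cons, hs, hne, Ne.symm hjk]
        · have hjk : j ≠ k := fun h => hs (by rw [h])
          have hmem : seaF (dates[j]?.getD 0) ∈ PySem.Set.add st.2 (seaF (dates[k]?.getD 0)) ↔
              seaF (dates[j]?.getD 0) ∈ st.2 := by
            rw [PySem.Set.mem_add]
            constructor
            · rintro (h | h)
              · exact h
              · exact absurd h.symm hs
            · exact Or.inl
          rw [show List.find? (fun p => seaF p.2 == seaF (dates[j]?.getD 0))
                (((k : Int), dates[k]?.getD 0) :: rest) =
              List.find? (fun p => seaF p.2 == seaF (dates[j]?.getD 0)) rest from by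
            simp [List.find?_cons, hs]]
          simp [hmem, Ne.symm hjk]

theorem g2_length (ps : List (Int × Int)) (st : List String × PySem.Set Int) :
    ((ps.foldl g2 st).1).length = st.1.length := by
  induction ps generalizing st with
  | nil => rfl
  | cons p rest ih =>
      simp only [List.foldl_cons]
      rw [ih]
      unfold g2
      split <;> simp [PySem.List.length_pySetD]

-- ---- B-side characterisation (the group-by dict and the emission loop) ----

-- middle-cycle indices of season s among the enumerated pairs, in order
def midsOf (l : List (Int × Int)) (s : Int) : List Int :=
  (l.filter (fun p => seaF p.2 == s && cycF p.2 == 1)).map (·.1)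

-- index of the first occurrence of season s
def first? (l : List (Int × Int)) (s : Int) : Option Int :=
  (l.find? (fun p => seaF p.2 == s)).map (·.1)

theorem bStep_nodup (d : PySem.Dict Int (List Int × Int)) (p : Int × Int)
    (h : d.keys.Nodup) : (bStep d p).keys.Nodup := by
  simp only [bStep, PySem.Dict.modify]
  split <;> split <;>
    first
      | exact h
      | exact PySem.Dict.nodup_keys_insert _ _ _ h
      | exact PySem.Dict.nodup_keys_insert _ _ _ (PySem.Dict.nodup_keys_insert _ _ _ h)

theorem foldl_bStep_nodup (l : List (Int × Int)) (d : PySem.Dict Int (List Int × Int))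
    (h : d.keys.Nodup) : (l.foldl bStep d).keys.Nodup := by
  induction l generalizing d with
  | nil => exact h
  | cons p rest ih => exact ih _ (bStep_nodup d p h)

-- what the group-by fold holds for key s, relative to any starting dict
theorem info_get? (l : List (Int × Int)) (d : PySem.Dict Int (List Int × Int)) (s : Int) :
    (l.foldl bStep d).get? s =
      match d.get? s with
      | some mf => some (mf.1 ++ midsOf l s, mf.2)
      | none => (first? l s).map (fun i => (midsOf l s, i)) := by
  induction l generalizing d with
  | nil =>
      cases hd : d.get? s <;> simp [midsOf, first?, hd]
  | cons p rest ih =>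
      simp only [List.foldl_cons]
      rw [ih]
      have hstep : (bStep d p).get? s =
          if s = seaF p.2 then
            match d.get? (seaF p.2) with
            | some mf => some (if cycF p.2 = 1 then (mf.1 ++ [p.1], mf.2) else mf)
            | none => some (if cycF p.2 = 1 then ([p.1], p.1) else ([], p.1))
          else d.get? s := by
        simp only [bStep, PySem.Dict.modify]
        by_cases hc : d.contains (seaF p.2)
        · obtain ⟨mf, hmf⟩ : ∃ mf, d.get? (seaF p.2) = some mf := by
            cases hg : d.get? (seaF p.2) with
            | none => rw [PySem.Dict.get?_eq_none_iff_contains] at hg; rw [hg] at hc; simp at hc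
            | some mf => exact ⟨mf, rfl⟩
          have hgetD : d.getD (seaF p.2) ([], 0) = mf := by
            rw [PySem.Dict.getD_eq_get?_getD, hmf]; rfl
          by_cases hcy : cycF p.2 = 1
          · rw [if_pos hc, if_pos (by simpa [cycF] using hcy)]
            rw [PySem.Dict.get?_insert, hgetD, hmf]
            by_cases hs : s = seaF p.2 <;> simp [hs, hcy, hmf]
          · rw [if_pos hc, if_neg (by simpa [cycF] using hcy)]
            by_cases hs : s = seaF p.2 <;> simp [hs, hcy, hmf]
        · have hg : d.get? (seaF p.2) = none := by
            rw [PySem.Dict.get?_eq_none_iff_contains]; simpa using hc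
          have hgetD : (d.insert (seaF p.2) ([], p.1)).getD (seaF p.2) ([], 0) = ([], p.1) := by
            rw [PySem.Dict.getD_eq_get?_getD, PySem.Dict.get?_insert_self]
            rfl
          by_cases hcy : cycF p.2 = 1
          · rw [if_neg hc, if_pos (by simpa [cycF] using hcy)]
            rw [PySem.Dict.get?_insert, hgetD]
            by_cases hs : s = seaF p.2
            · simp [hs, hcy, hg]
            · rw [if_neg hs, PySem.Dict.get?_insert, if_neg hs]
              simp [hs, hg]
          · rw [if_neg hc, if_neg (by simpa [cycF] using hcy)]
            rw [PySem.Dict.get?_insert, hg]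
            by_cases hs : s = seaF p.2 <;> simp [hs, hcy]
      rw [hstep]
      have hmids : midsOf (p :: rest) s =
          if seaF p.2 = s ∧ cycF p.2 = 1 then p.1 :: midsOf rest s else midsOf rest s := by
        simp only [midsOf, List.filter_cons]
        by_cases h1 : seaF p.2 = s <;> by_cases h2 : cycF p.2 = 1 <;>
          simp [h1, h2]
      have hfirst : first? (p :: rest) s =
          if seaF p.2 = s then some p.1 else first? rest s := by
        simp only [first?, List.find?_cons]
        by_cases h1 : seaF p.2 = s
        · simp [h1]
        · have hb : (seaF p.2 == s) = false := by simp [h1]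
          simp [h1, hb]
      rw [hmids, hfirst]
      by_cases hs : s = seaF p.2
      · rw [if_pos hs]
        cases hd : d.get? s with
        | some mf =>
            have hd' : d.get? (seaF p.2) = some mf := hs ▸ hd
            by_cases hcy : cycF p.2 = 1 <;>
              simp [hs, hd, hd', hcy, List.append_assoc]
        | none =>
            have hd' : d.get? (seaF p.2) = none := hs ▸ hd
            by_cases hcy : cycF p.2 = 1 <;>
              simp [hs, hd, hd', hcy]
      · rw [if_neg hs]
        have hs' : ¬ seaF p.2 = s := fun h => hs h.symm
        cases hd : d.get? s <;> simp [hd, hs']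

-- validity of a dict entry: all its indices are in-range nat casts of positions whose season is the key
def eValid (dates : List Int) (e : Int × (List Int × Int)) : Prop :=
  (∀ i ∈ e.2.1, ∃ k : Nat, k < dates.length ∧ i = (k : Int) ∧ seaF (dates[k]?.getD 0) = e.1) ∧
  (∃ k : Nat, k < dates.length ∧ e.2.2 = (k : Int) ∧ seaF (dates[k]?.getD 0) = e.1)

-- the inner write loop over a list of middle-cycle indices
theorem setsFold_get (m : List Int) (v : String) (lb : List String) (j : Nat)
    (hj : j < lb.length)
    (hm : ∀ i ∈ m, ∃ k : Nat, k < lb.length ∧ i = (k : Int)) :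
    (m.foldl (fun lb i => PySem.List.pySetD lb i v) lb)[j]?.getD "" =
      if (j : Int) ∈ m then v else lb[j]?.getD "" := by
  induction m generalizing lb with
  | nil => simp
  | cons i rest ih =>
      obtain ⟨k, hk, rfl⟩ := hm i (by simp)
      simp only [List.foldl_cons, PySem.List.pySetD_natCast]
      rw [ih _ (by simpa using hj) (fun i hi => by
        obtain ⟨k', hk', rfl⟩ := hm i (by simp [hi]); exact ⟨k', by simpa using hk', rfl⟩)]
      by_cases hmem : (j : Int) ∈ rest
      · simp [hmem]
      · rw [if_neg hmem, getD_set_eq_ite _ _ _ _ hk]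
        by_cases hkj : k = j
        · subst hkj
          simp
        · have : ¬ ((j : Int) = (k : Int)) := by
            intro h; exact hkj (by exact_mod_cast h.symm)
          simp [hmem, hkj, this]

theorem setsFold_length (m : List Int) (v : String) (lb : List String) :
    (m.foldl (fun lb i => PySem.List.pySetD lb i v) lb).length = lb.length := by
  induction m generalizing lb with
  | nil => rfl
  | cons i rest ih => simp [List.foldl_cons, ih, PySem.List.length_pySetD]

theorem bEmit_length (lb : List String) (e : Int × (List Int × Int)) :
    (bEmit lb e).length = lb.length := by
  unfold bEmit
  split
  · exact setsFold_length _ _ _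
  · exact PySem.List.length_pySetD _ _ _

theorem emitFold_length (L : List (Int × (List Int × Int))) (lb : List String) :
    (L.foldl bEmit lb).length = lb.length := by
  induction L generalizing lb with
  | nil => rfl
  | cons e rest ih => simp [List.foldl_cons, ih, bEmit_length]

-- entries whose key is not j's season never write position j
theorem emit_untouched (dates : List Int) (L : List (Int × (List Int × Int)))
    (lb : List String) (j : Nat) (hj : j < dates.length) (hlen : lb.length = dates.length)
    (hL : ∀ e ∈ L, eValid dates e)
    (hne : ∀ e ∈ L, e.1 ≠ seaF (dates[j]?.getD 0)) :
    (L.foldl bEmit lb)[j]?.getD "" = lb[j]?.getD "" := by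
  induction L generalizing lb with
  | nil => rfl
  | cons e rest ih =>
      simp only [List.foldl_cons]
      rw [ih _ (by simp [bEmit_length, hlen]) (fun e' he' => hL e' (by simp [he']))
            (fun e' he' => hne e' (by simp [he']))]
      obtain ⟨hm, k0, hk0, hfi, hsk0⟩ := hL e (by simp)
      have hkey : e.1 ≠ seaF (dates[j]?.getD 0) := hne e (by simp)
      unfold bEmit
      split
      · rw [setsFold_get _ _ _ _ (by omega) (fun i hi => by
          obtain ⟨k, hk, rfl, _⟩ := hm i hi; exact ⟨k, by omega, rfl⟩)]
        rw [if_neg (by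
          intro hmem
          obtain ⟨k, hk, hkj, hsk⟩ := hm _ hmem
          have hkjn : k = j := by exact_mod_cast hkj.symm
          exact hkey (hkjn ▸ hsk ▸ rfl)
          )]
      · rw [hfi, PySem.List.pySetD_natCast, getD_set_eq_ite _ _ _ _ (by omega)]
        rw [if_neg (by
          intro hkj
          exact hkey (hkj ▸ hsk0 ▸ rfl))]

-- value of position j after the whole emission loop, given its season's entry
theorem emit_main (dates : List Int) (L : List (Int × (List Int × Int)))
    (lb : List String) (j : Nat) (hj : j < dates.length) (hlen : lb.length = dates.length)
    (hL : ∀ e ∈ L, eValid dates e) (hnd : (L.map (·.1)).Nodup)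
    (M : List Int) (F : Int)
    (hfound : (seaF (dates[j]?.getD 0), (M, F)) ∈ L) :
    (L.foldl bEmit lb)[j]?.getD "" =
      if M ≠ [] then (if (j : Int) ∈ M then PySem.Int.toStr (seaF (dates[j]?.getD 0))
                      else lb[j]?.getD "")
      else (if F = (j : Int) then PySem.Int.toStr (seaF (dates[j]?.getD 0))
            else lb[j]?.getD "") := by
  induction L generalizing lb with
  | nil => simp at hfound
  | cons e rest ih =>
      rw [List.map_cons] at hnd
      simp only [List.foldl_cons]
      rcases List.mem_cons.mp hfound with heq | hrest
      · -- e is the entry of j's season; the rest never touches j (keys are distinct)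
        subst heq
        have hkeys : ∀ e' ∈ rest, e'.1 ≠ seaF (dates[j]?.getD 0) := by
          intro e' he' hk
          exact (List.nodup_cons.mp hnd).1
            (by simpa using List.mem_map.mpr ⟨e', he', hk⟩)
        rw [emit_untouched dates rest _ j hj (by simp [bEmit_length, hlen])
              (fun e' he' => hL e' (by simp [he'])) hkeys]
        obtain ⟨hm, k0, hk0, hfi, hsk0⟩ := hL _ (List.mem_cons_self ..)
        simp only at hm hfi hsk0
        unfold bEmit
        simp only []
        by_cases hM : M = []
        · rw [if_neg (not_not_intro hM), if_neg (not_not_intro hM)]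
          rw [hfi, PySem.List.pySetD_natCast, getD_set_eq_ite _ _ _ _ (by omega)]
          by_cases hkj : k0 = j
          · subst hkj
            simp [hfi]
          · have h1 : ¬ ((k0 : Int) = (j : Int)) := by
              intro h; exact hkj (by exact_mod_cast h)
            simp [hkj, hfi, h1]
        · rw [if_pos hM, if_pos hM]
          rw [setsFold_get _ _ _ _ (by omega) (fun i hi => by
            obtain ⟨k, hk, rfl, _⟩ := hm i hi; exact ⟨k, by omega, rfl⟩)]
      · -- e's key differs from j's season (distinct keys), so bEmit leaves j alone
        have hkey : e.1 ≠ seaF (dates[j]?.getD 0) := by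
          intro hk
          have hmm : seaF (dates[j]?.getD 0) ∈ rest.map (·.1) := by
            simpa using List.mem_map_of_mem (f := (·.1)) hrest
          exact (List.nodup_cons.mp hnd).1 (hk ▸ hmm)
        have hstep : (bEmit lb e)[j]?.getD "" = lb[j]?.getD "" := by
          obtain ⟨hm, k0, hk0, hfi, hsk0⟩ := hL e (by simp)
          unfold bEmit
          split
          · rw [setsFold_get _ _ _ _ (by omega) (fun i hi => by
              obtain ⟨k, hk, rfl, _⟩ := hm i hi; exact ⟨k, by omega, rfl⟩)]
            rw [if_neg (by
              intro hmem
              obtain ⟨k, hk, hkj, hsk⟩ := hm _ hmem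
              have hkjn : k = j := by exact_mod_cast hkj.symm
              exact hkey (hkjn ▸ hsk ▸ rfl))]
          · rw [hfi, PySem.List.pySetD_natCast, getD_set_eq_ite _ _ _ _ (by omega)]
            rw [if_neg (by intro hkj; exact hkey (hkj ▸ hsk0 ▸ rfl))]
        rw [ih _ (by simp [bEmit_length, hlen]) (fun e' he' => hL e' (by simp [he']))
              (List.nodup_cons.mp hnd).2 hrest, hstep]

-- ---- putting the two characterisations together ----

theorem key_get (dates : List Int) (j : Nat) (hi : j < dates.length) :
    (date_str_ticks dates)[j]?.getD "" = (date_str_ticks_alt dates)[j]?.getD "" := by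
  have hv : ∀ p ∈ PySem.List.enumerate dates 0,
      ∃ k : Nat, k < dates.length ∧ p = ((k : Int), dates[k]?.getD 0) := by
    intro p hp
    rcases (PySem.List.mem_enumerate_iff dates 0 p).mp hp with ⟨k, hk, rfl⟩
    exact ⟨k, hk, by simp [List.getElem?_eq_getElem hk]⟩
  -- ---- A side ----
  have hA : date_str_ticks dates =
      ((PySem.List.enumerate dates 0).foldl g2
        ((PySem.List.enumerate dates 0).foldl g1
          (dates.map (fun _ => ""), PySem.Set.empty))).1 := by
    show ((PySem.List.enumerate dates 0).foldl (aPass2 (dates.map date_to_season_cycle))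
        ((PySem.List.enumerate dates 0).foldl (aPass1 (dates.map date_to_season_cycle))
          (dates.map (fun _ => ""), PySem.Set.empty))).1 = _
    rw [foldl_congr' _ _ g1 _ (fun b x hx => aPass1_eq_g1 dates b x hx),
        foldl_congr' _ _ g2 _ (fun b x hx => aPass2_eq_g2 dates b x hx)]
  have hlen1 : ((PySem.List.enumerate dates 0).foldl g1
      (dates.map (fun _ => ""), PySem.Set.empty)).1.length = dates.length := by
    rw [g1_length]
    simp
  have hmemenum : ((j : Int), dates[j]?.getD 0) ∈ PySem.List.enumerate dates 0 := by
    rw [PySem.List.mem_enumerate_iff]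
    exact ⟨j, hi, by simp [List.getElem?_eq_getElem hi]⟩
  have hseen : seaF (dates[j]?.getD 0) ∈
      ((PySem.List.enumerate dates 0).foldl g1 (dates.map (fun _ => ""), PySem.Set.empty)).2 ↔
      ∃ p ∈ PySem.List.enumerate dates 0, cycF p.2 = 1 ∧ seaF p.2 = seaF (dates[j]?.getD 0) := by
    rw [g1_snd_mem]
    constructor
    · rintro (h | h)
      · simp [PySem.Set.empty] at h
      · exact h
    · exact Or.inr
  have hAj : (date_str_ticks dates)[j]?.getD "" =
      if seaF (dates[j]?.getD 0) ∉
           ((PySem.List.enumerate dates 0).foldl g1 (dates.map (fun _ => ""), PySem.Set.empty)).2 ∧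
         (PySem.List.enumerate dates 0).find? (fun p => seaF p.2 == seaF (dates[j]?.getD 0)) =
           some ((j : Int), dates[j]?.getD 0)
      then PySem.Int.toStr (seaF (dates[j]?.getD 0))
      else if ((j : Int), dates[j]?.getD 0) ∈ PySem.List.enumerate dates 0 ∧
              cycF (dates[j]?.getD 0) = 1
           then PySem.Int.toStr (seaF (dates[j]?.getD 0)) else "" := by
    rw [hA, g2_get dates _ _ j hv hi hlen1, g1_get dates _ _ j hv hi (by simp)]
    have hinit : ((dates.map (fun _ => "")) : List String)[j]?.getD "" = "" := by
      simp [List.getElem?_eq_getElem hi]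
    rw [hinit]
  -- ---- B side ----
  have hndinfo : ((PySem.List.enumerate dates 0).foldl bStep PySem.Dict.empty).keys.Nodup :=
    foldl_bStep_nodup _ _ (PySem.Dict.nodup_keys_empty)
  -- every entry of the grouping dict is a valid (key, (mids, first)) record
  have hvalid : ∀ e ∈ ((PySem.List.enumerate dates 0).foldl bStep PySem.Dict.empty).items,
      eValid dates e := by
    intro e he
    have hg : ((PySem.List.enumerate dates 0).foldl bStep PySem.Dict.empty).get? e.1 = some e.2 :=
      PySem.Dict.get?_of_mem_items _ he hndinfo
    rw [info_get? _ _ _ ] at hg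
    simp only [PySem.Dict.get?_empty] at hg
    obtain ⟨i0, hfind, hval⟩ := Option.map_eq_some_iff.mp hg
    constructor
    · intro i hiM
      rw [← hval] at hiM
      simp only [midsOf, List.mem_map] at hiM
      obtain ⟨q, hq, rfl⟩ := hiM
      have hqE := List.mem_filter.mp hq
      rcases (PySem.List.mem_enumerate_iff dates 0 q).mp hqE.1 with ⟨k, hk, rfl⟩
      refine ⟨k, hk, by simp, ?_⟩
      have := hqE.2
      simp only [Bool.and_eq_true, beq_iff_eq] at this
      simpa [List.getElem?_eq_getElem hk] using this.1
    · obtain ⟨q, hq⟩ : ∃ q, (PySem.List.enumerate dates 0).find?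
          (fun p => seaF p.2 == e.1) = some q := by
        simp only [first?] at hfind
        obtain ⟨q, hq, _⟩ := Option.map_eq_some_iff.mp hfind
        exact ⟨q, hq⟩
      have hqmem := List.mem_of_find?_eq_some hq
      have hqpred := List.find?_some hq
      rcases (PySem.List.mem_enumerate_iff dates 0 q).mp hqmem with ⟨k, hk, rfl⟩
      refine ⟨k, hk, ?_, ?_⟩
      · have : e.2.2 = i0 := by rw [← hval]
        rw [this]
        simp only [first?, hq] at hfind
        have := Option.some.inj hfind
        simp [← this]
      · simpa [List.getElem?_eq_getElem hk] using (beq_iff_eq.mp hqpred)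
  -- the entry of j's own season
  obtain ⟨q, hq⟩ : ∃ q, (PySem.List.enumerate dates 0).find?
      (fun p => seaF p.2 == seaF (dates[j]?.getD 0)) = some q := by
    have : ∃ p ∈ PySem.List.enumerate dates 0,
        (fun p => seaF p.2 == seaF (dates[j]?.getD 0)) p = true :=
      ⟨_, hmemenum, by simp⟩
    obtain ⟨q, hq⟩ := Option.isSome_iff_exists.mp (List.find?_isSome.mpr this)
    exact ⟨q, hq⟩
  have hinfoj : ((PySem.List.enumerate dates 0).foldl bStep PySem.Dict.empty).get?
      (seaF (dates[j]?.getD 0)) =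
      some (midsOf (PySem.List.enumerate dates 0) (seaF (dates[j]?.getD 0)), q.1) := by
    rw [info_get?]
    simp [first?, hq]
  have hfound := PySem.Dict.mem_items_of_get?_eq_some _ hinfoj
  have hBj : (date_str_ticks_alt dates)[j]?.getD "" =
      if midsOf (PySem.List.enumerate dates 0) (seaF (dates[j]?.getD 0)) ≠ [] then
        (if (j : Int) ∈ midsOf (PySem.List.enumerate dates 0) (seaF (dates[j]?.getD 0))
         then PySem.Int.toStr (seaF (dates[j]?.getD 0)) else "")
      else (if q.1 = (j : Int) then PySem.Int.toStr (seaF (dates[j]?.getD 0)) else "") := by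
    show ((((PySem.List.enumerate dates 0).foldl bStep PySem.Dict.empty).items.foldl bEmit
        (List.replicate dates.length ""))[j]?.getD "") = _
    rw [emit_main dates _ _ j hi (by simp) hvalid hndinfo _ _ hfound]
    simp [List.getElem?_replicate, hi]
  -- ---- linking facts ----
  have hjM : (j : Int) ∈ midsOf (PySem.List.enumerate dates 0) (seaF (dates[j]?.getD 0)) ↔
      cycF (dates[j]?.getD 0) = 1 := by
    simp only [midsOf, List.mem_map]
    constructor
    · rintro ⟨p, hp, hp1⟩
      have hpE := List.mem_filter.mp hp
      rcases (PySem.List.mem_enumerate_iff dates 0 p).mp hpE.1 with ⟨k, hk, rfl⟩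
      have hkj : k = j := by simpa using hp1
      subst hkj
      have := hpE.2
      simp only [Bool.and_eq_true, beq_iff_eq] at this
      simpa [List.getElem?_eq_getElem hk] using this.2
    · intro hcy
      refine ⟨((j : Int), dates[j]?.getD 0), List.mem_filter.mpr ⟨hmemenum, ?_⟩, rfl⟩
      simp [hcy]
  have hMne : midsOf (PySem.List.enumerate dates 0) (seaF (dates[j]?.getD 0)) ≠ [] ↔
      ∃ p ∈ PySem.List.enumerate dates 0, cycF p.2 = 1 ∧ seaF p.2 = seaF (dates[j]?.getD 0) := by
    constructor
    · intro h
      cases hM : midsOf (PySem.List.enumerate dates 0) (seaF (dates[j]?.getD 0)) with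
      | nil => exact absurd hM h
      | cons a t =>
          have ha : a ∈ midsOf (PySem.List.enumerate dates 0) (seaF (dates[j]?.getD 0)) := by
            rw [hM]; simp
          simp only [midsOf, List.mem_map] at ha
          obtain ⟨p, hp, _⟩ := ha
          have hpf := List.mem_filter.mp hp
          have hb := hpf.2
          simp only [Bool.and_eq_true, beq_iff_eq] at hb
          exact ⟨p, hpf.1, hb.2, hb.1⟩
    · rintro ⟨p, hp, h1, h2⟩ hnil
      have hmm : p.1 ∈ midsOf (PySem.List.enumerate dates 0) (seaF (dates[j]?.getD 0)) := by
        simp only [midsOf, List.mem_map]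
        exact ⟨p, List.mem_filter.mpr ⟨hp, by simp [h1, h2]⟩, rfl⟩
      rw [hnil] at hmm
      simp at hmm
  have hF : q.1 = (j : Int) ↔
      (PySem.List.enumerate dates 0).find? (fun p => seaF p.2 == seaF (dates[j]?.getD 0)) =
        some ((j : Int), dates[j]?.getD 0) := by
    constructor
    · intro h
      rcases (PySem.List.mem_enumerate_iff dates 0 q).mp (List.mem_of_find?_eq_some hq)
        with ⟨k, hk, hkq⟩
      rw [hq, hkq]
      have hkj : k = j := by
        have := congrArg Prod.fst hkq
        simp only [h] at this
        omega
      subst hkj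
      simp [List.getElem?_eq_getElem hk]
    · intro h
      rw [hq] at h
      rw [Option.some.inj h]
  -- ---- case analysis ----
  rw [hAj, hBj]
  by_cases hcy : cycF (dates[j]?.getD 0) = 1
  · have hS : ∃ p ∈ PySem.List.enumerate dates 0,
        cycF p.2 = 1 ∧ seaF p.2 = seaF (dates[j]?.getD 0) := ⟨_, hmemenum, hcy, rfl⟩
    have hnot : ¬ (seaF (dates[j]?.getD 0) ∉
          ((PySem.List.enumerate dates 0).foldl g1 (dates.map (fun _ => ""), PySem.Set.empty)).2 ∧
        (PySem.List.enumerate dates 0).find? (fun p => seaF p.2 == seaF (dates[j]?.getD 0)) =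
          some ((j : Int), dates[j]?.getD 0)) :=
      fun h => h.1 (hseen.mpr hS)
    rw [if_neg hnot,
        if_pos (⟨hmemenum, hcy⟩ : ((j : Int), dates[j]?.getD 0) ∈ PySem.List.enumerate dates 0 ∧
          cycF (dates[j]?.getD 0) = 1),
        if_pos (hMne.mpr hS), if_pos (hjM.mpr hcy)]
  · have hin : ¬ (((j : Int), dates[j]?.getD 0) ∈ PySem.List.enumerate dates 0 ∧
        cycF (dates[j]?.getD 0) = 1) := fun h => hcy h.2
    by_cases hS : ∃ p ∈ PySem.List.enumerate dates 0,
        cycF p.2 = 1 ∧ seaF p.2 = seaF (dates[j]?.getD 0)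
    · have hnot : ¬ (seaF (dates[j]?.getD 0) ∉
            ((PySem.List.enumerate dates 0).foldl g1 (dates.map (fun _ => ""), PySem.Set.empty)).2 ∧
          (PySem.List.enumerate dates 0).find? (fun p => seaF p.2 == seaF (dates[j]?.getD 0)) =
            some ((j : Int), dates[j]?.getD 0)) :=
        fun h => h.1 (hseen.mpr hS)
      have hjM' : ¬ ((j : Int) ∈ midsOf (PySem.List.enumerate dates 0) (seaF (dates[j]?.getD 0))) :=
        fun h => hcy (hjM.mp h)
      rw [if_neg hnot, if_neg hin, if_pos (hMne.mpr hS), if_neg hjM']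
    · have hseen' : seaF (dates[j]?.getD 0) ∉
          ((PySem.List.enumerate dates 0).foldl g1 (dates.map (fun _ => ""), PySem.Set.empty)).2 :=
        fun h => hS (hseen.mp h)
      have hM0 : midsOf (PySem.List.enumerate dates 0) (seaF (dates[j]?.getD 0)) = [] :=
        not_not.mp (fun h => hS (hMne.mp h))
      have hMnn : ¬ (midsOf (PySem.List.enumerate dates 0) (seaF (dates[j]?.getD 0)) ≠ []) :=
        not_not_intro hM0
      by_cases hFj : q.1 = (j : Int)
      · rw [if_pos (⟨hseen', hF.mp hFj⟩ : seaF (dates[j]?.getD 0) ∉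
              ((PySem.List.enumerate dates 0).foldl g1 (dates.map (fun _ => ""), PySem.Set.empty)).2 ∧
            (PySem.List.enumerate dates 0).find? (fun p => seaF p.2 == seaF (dates[j]?.getD 0)) =
              some ((j : Int), dates[j]?.getD 0)),
            if_neg hMnn, if_pos hFj]
      · have hnot : ¬ (seaF (dates[j]?.getD 0) ∉
              ((PySem.List.enumerate dates 0).foldl g1 (dates.map (fun _ => ""), PySem.Set.empty)).2 ∧
            (PySem.List.enumerate dates 0).find? (fun p => seaF p.2 == seaF (dates[j]?.getD 0)) =
              some ((j : Int), dates[j]?.getD 0)) :=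
          fun h => hFj (hF.mpr h.2)
        rw [if_neg hnot, if_neg hin, if_neg hMnn, if_neg hFj]

-- ===== VERDICT (by name: the statement is the Claim_ definition above) =====
theorem date_str_ticks_spec : Claim_equal_date_str_ticks := by
  intro dates _
  show date_str_ticks dates = date_str_ticks_alt dates
  have hlenA : (date_str_ticks dates).length = dates.length := by
    show (((PySem.List.enumerate dates 0).foldl (aPass2 (dates.map date_to_season_cycle))
        ((PySem.List.enumerate dates 0).foldl (aPass1 (dates.map date_to_season_cycle))
          (dates.map (fun _ => ""), PySem.Set.empty))).1).length = dates.length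
    rw [foldl_congr' _ _ g1 _ (fun b x hx => aPass1_eq_g1 dates b x hx),
        foldl_congr' _ _ g2 _ (fun b x hx => aPass2_eq_g2 dates b x hx),
        g2_length, g1_length]
    simp
  have hlenB : (date_str_ticks_alt dates).length = dates.length := by
    show ((((PySem.List.enumerate dates 0).foldl bStep PySem.Dict.empty).items.foldl bEmit
        (List.replicate dates.length "")).length) = dates.length
    rw [emitFold_length]
    simp
  apply List.ext_getElem?
  intro i
  by_cases hi : i < dates.length
  · rw [List.getElem?_eq_getElem (by omega : i < (date_str_ticks dates).length),
        List.getElem?_eq_getElem (by omega : i < (date_str_ticks_alt dates).length)]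
    have key := key_get dates i hi
    rw [List.getElem?_eq_getElem (by omega : i < (date_str_ticks dates).length),
        List.getElem?_eq_getElem (by omega : i < (date_str_ticks_alt dates).length)] at key
    simpa using key
  · rw [List.getElem?_eq_none (by omega), List.getElem?_eq_none (by omega)]
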